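-- pv_equiv track=rewrite | github.com/arieldelplata/proyectos | parser/afds.py | afd_end
-- ===== SOURCE A (Python) =====
-- def afd_end (cadena):
--     estado_no_final=[0,1,2]
--     estado_final=[3]
--     estado_trampa='t'
--     estado=0
--     delta={
--         0: {chr(c): 1 if ('e'== chr(c) ) else estado_trampa for c in range(128)},
--         1: {chr(c): 2 if ('n'== chr(c) ) else estado_trampa for c in range(128)},
--         2: {chr(c): 3 if ('d'==chr(c) ) else estado_trampa for c in range(128)},
--
--     }
--     for caracter in cadena:
--         if estado in delta and caracter in delta[estado]:
--             estado = delta[estado][caracter]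
--         else:
--             estado = estado_trampa
--             break
--     if estado in estado_final:
--             #estado_final=estado_final
--         estado_final='aceptado'
--     elif estado == estado_trampa:
--             #estado_final=estado_trampa
--         estado_final='trampa'
--     elif estado in estado_no_final:
--         #estado_final=estado_no_final
--         estado_final='no aceptado'
--     return estado_final
-- ===== SOURCE B (Python) =====
-- def afd_end(cadena):
--     # closed-form three-way classification: exact match / proper prefix / anything else
--     if cadena == 'end':
--         return 'aceptado'
--     if 'end'.startswith(cadena):
--         return 'no aceptado'
--     return 'trampa'
-- ===== Notes on version B (the rewrite author's own statement) =====
-- stated objective: simpler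
-- what changed: Replaces the per-call 3x128-entry transition-table DFA simulation (per-character dict lookups with a trap state) by a direct closed-form three-way classification: exact match, proper prefix of the target word, or anything else.
import Mathlib
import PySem

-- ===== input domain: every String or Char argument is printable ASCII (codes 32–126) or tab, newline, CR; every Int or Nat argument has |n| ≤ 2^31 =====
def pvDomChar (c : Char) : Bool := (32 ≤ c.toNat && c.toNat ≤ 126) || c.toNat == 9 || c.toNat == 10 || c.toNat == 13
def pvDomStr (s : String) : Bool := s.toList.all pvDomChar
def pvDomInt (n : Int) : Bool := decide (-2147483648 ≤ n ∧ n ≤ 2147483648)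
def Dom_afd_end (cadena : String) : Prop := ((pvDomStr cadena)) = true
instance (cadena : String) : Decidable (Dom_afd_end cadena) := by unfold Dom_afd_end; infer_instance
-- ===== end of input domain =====

-- B replaces A's per-call 3x128 transition-table DFA loop by a closed-form
-- three-way classification (equal / proper prefix of "end" / other): simpler.

-- ===== PORT A =====
-- estado is either an int state or the trap marker 't'
inductive PvEstado where
  | st : Int → PvEstado
  | trampa
deriving DecidableEq, Repr

-- {chr(c): nxt if tgt == chr(c) else 't' for c in range(128)}
def pvRow (tgt : Char) (nxt : Int) : PySem.Dict Char PvEstado :=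
  (PySem.List.pyRange 0 128 1).foldl
    (fun d i => d.insert (Char.ofNat i.toNat)
      (if tgt = Char.ofNat i.toNat then PvEstado.st nxt else PvEstado.trampa))
    PySem.Dict.empty

def pvDelta : PySem.Dict Int (PySem.Dict Char PvEstado) :=
  ((PySem.Dict.empty.insert 0 (pvRow 'e' 1)).insert 1 (pvRow 'n' 2)).insert 2 (pvRow 'd' 3)

-- the for-loop with its break (break ≡ remaining characters ignored, state already 't')
def pvLoopA (estado : PvEstado) : List Char → PvEstado
  | [] => estado
  | c :: rest =>
    match estado with
    | .st n =>
      match pvDelta.get? n with          -- estado in delta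
      | some row =>
        match row.get? c with            -- caracter in delta[estado]
        | some e' => pvLoopA e' rest
        | none => PvEstado.trampa        -- else: estado = trampa; break
      | none => PvEstado.trampa          -- else: estado = trampa; break
    | .trampa => PvEstado.trampa         -- 't' not a key of delta: break

def afd_end (cadena : String) : String :=
  let estado := pvLoopA (PvEstado.st 0) cadena.toList
  if estado ∈ [PvEstado.st 3] then "aceptado"
  else if estado = PvEstado.trampa then "trampa"
  else if estado ∈ [PvEstado.st 0, PvEstado.st 1, PvEstado.st 2] then "no aceptado"
  else ""  -- unreachable: estado is always st 0..3 or trampa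

-- ===== PORT B =====
def afd_end_alt (cadena : String) : String :=
  if cadena = "end" then "aceptado"
  else if PySem.Str.startswith "end" cadena then "no aceptado"
  else "trampa"

-- ===== PRECONDITION & SPEC =====
def Spec_afd_end (cadena : String) (out : String) : Prop := out = afd_end_alt cadena
instance (cadena : String) (out : String) : Decidable (Spec_afd_end cadena out) := by unfold Spec_afd_end; infer_instance

-- ===== CLAIM (what is proved, stated in full; the proofs are below) =====
def Claim_equal_afd_end : Prop := ∀ (cadena : String), Dom_afd_end cadena → Spec_afd_end cadena (afd_end cadena)

-- ===== LEMMAS AND PROOFS =====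

lemma pvRow_fold (tgt : Char) (nxt : Int) (L : List Int) (d : PySem.Dict Char PvEstado) (c : Char) :
    (L.foldl (fun d i => d.insert (Char.ofNat i.toNat)
        (if tgt = Char.ofNat i.toNat then PvEstado.st nxt else PvEstado.trampa)) d).get? c
      = if ∃ i ∈ L, Char.ofNat i.toNat = c
        then some (if tgt = c then PvEstado.st nxt else PvEstado.trampa)
        else d.get? c := by
  induction L using List.reverseRecOn with
  | nil => simp
  | append_singleton L i ih =>
    rw [List.foldl_append, List.foldl_cons, List.foldl_nil, PySem.Dict.get?_insert, ih]
    by_cases hc : c = Char.ofNat i.toNat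
    · subst hc
      rw [if_pos rfl]
      exact (if_pos (show ∃ x ∈ L ++ [i], Char.ofNat x.toNat = Char.ofNat i.toNat from ⟨i, by simp⟩)).symm
    · have hc' : Char.ofNat i.toNat ≠ c := Ne.symm hc
      rw [if_neg hc]
      by_cases hL : ∃ x ∈ L, Char.ofNat x.toNat = c
      · obtain ⟨x, hx, hp⟩ := hL
        rw [if_pos (show ∃ y ∈ L, Char.ofNat y.toNat = c from ⟨x, hx, hp⟩)]
        exact (if_pos (show ∃ y ∈ L ++ [i], Char.ofNat y.toNat = c from
          ⟨x, List.mem_append_left _ hx, hp⟩)).symm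
      · rw [if_neg hL, if_neg (fun h => ?_)]
        obtain ⟨x, hx, hp⟩ := h
        rcases List.mem_append.mp hx with hxL | hxi
        · exact hL ⟨x, hxL, hp⟩
        · rw [List.mem_singleton.mp hxi] at hp
          exact hc' hp

lemma pvRow_get (tgt : Char) (nxt : Int) (c : Char) (h : c.toNat < 128) :
    (pvRow tgt nxt).get? c = some (if tgt = c then PvEstado.st nxt else PvEstado.trampa) := by
  unfold pvRow
  rw [pvRow_fold, if_pos]
  exact ⟨(c.toNat : Int), by
    constructor
    · rw [PySem.List.mem_pyRange_one]; omega
    · simp [Char.ofNat_toNat]⟩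

lemma dom_char_lt (c : Char) (h : pvDomChar c = true) : c.toNat < 128 := by
  unfold pvDomChar at h
  simp only [Bool.or_eq_true, Bool.and_eq_true, decide_eq_true_eq, beq_iff_eq] at h
  omega

lemma delta_get0 : pvDelta.get? 0 = some (pvRow 'e' 1) := by
  rw [pvDelta, PySem.Dict.get?_insert, if_neg (by decide), PySem.Dict.get?_insert,
    if_neg (by decide), PySem.Dict.get?_insert, if_pos rfl]

lemma delta_get1 : pvDelta.get? 1 = some (pvRow 'n' 2) := by
  rw [pvDelta, PySem.Dict.get?_insert, if_neg (by decide), PySem.Dict.get?_insert, if_pos rfl]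

lemma delta_get2 : pvDelta.get? 2 = some (pvRow 'd' 3) := by
  rw [pvDelta, PySem.Dict.get?_insert, if_pos rfl]

lemma delta_get3 : pvDelta.get? 3 = none := by
  rw [pvDelta, PySem.Dict.get?_insert, if_neg (by decide), PySem.Dict.get?_insert,
    if_neg (by decide), PySem.Dict.get?_insert, if_neg (by decide)]
  rfl

lemma loop_trampa (cs : List Char) : pvLoopA PvEstado.trampa cs = PvEstado.trampa := by
  cases cs <;> rfl

lemma loop_st3 (cs : List Char) (h : cs ≠ []) : pvLoopA (PvEstado.st 3) cs = PvEstado.trampa := by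
  cases cs with
  | nil => exact absurd rfl h
  | cons c rest => simp [pvLoopA, delta_get3]

lemma loop_step (s nxt : Int) (tgt : Char) (hrow : pvDelta.get? s = some (pvRow tgt nxt))
    (c : Char) (cs : List Char) (h : c.toNat < 128) :
    pvLoopA (PvEstado.st s) (c :: cs)
      = if c = tgt then pvLoopA (PvEstado.st nxt) cs else PvEstado.trampa := by
  simp only [pvLoopA, hrow, pvRow_get tgt nxt c h]
  by_cases hc : c = tgt
  · simp [hc]
  · simp [hc, Ne.symm hc, loop_trampa]

lemma prefix_end (cs : List Char) :
    (PySem.Chars.startswith ['e', 'n', 'd'] cs = true) ↔ cs <+: ['e', 'n', 'd'] :=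
  PySem.Chars.startswith_iff _ _

-- ===== VERDICT (by name: the statement is the Claim_ definition above) =====
theorem afd_end_spec : Claim_equal_afd_end := by
  intro cadena hdom
  have hdc : ∀ c ∈ cadena.toList, c.toNat < 128 := by
    intro c hc
    unfold Dom_afd_end pvDomStr at hdom
    exact dom_char_lt c (List.all_eq_true.mp hdom c hc)
  have hend : (cadena = "end") ↔ cadena.toList = ['e', 'n', 'd'] :=
    ⟨fun h => by rw [h]; rfl, fun h => String.toList_inj.mp h⟩
  have hsw : PySem.Str.startswith "end" cadena
      = PySem.Chars.startswith ['e', 'n', 'd'] cadena.toList := by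
    simp only [PySem.Str.startswith_eq, String.reduceToList]
  unfold Spec_afd_end afd_end afd_end_alt
  rw [hsw]
  rcases hcs : cadena.toList with _ | ⟨c1, _ | ⟨c2, _ | ⟨c3, rest⟩⟩⟩ <;>
    rw [hcs] at hdc hend
  · -- ""
    have hne : ¬ cadena = "end" := fun h => by simp [hend] at h
    rw [if_neg hne,
      if_pos (show PySem.Chars.startswith ['e', 'n', 'd'] [] = true from
        (prefix_end []).mpr List.nil_prefix)]
    rfl
  · -- one character
    have hne : ¬ cadena = "end" := fun h => by simp [hend] at h
    rw [loop_step 0 1 'e' delta_get0 _ _ (hdc _ (by simp)), if_neg hne]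
    by_cases h1 : c1 = 'e'
    · subst h1
      rw [if_pos rfl,
        if_pos (show PySem.Chars.startswith ['e', 'n', 'd'] ['e'] = true by decide)]
      rfl
    · rw [if_neg h1,
        if_neg (show ¬ PySem.Chars.startswith ['e', 'n', 'd'] [c1] = true from
          fun hp => h1 (List.cons_prefix_cons.mp ((prefix_end [c1]).mp hp)).1)]
      rfl
  · -- two characters
    have hne : ¬ cadena = "end" := fun h => by simp [hend] at h
    rw [loop_step 0 1 'e' delta_get0 _ _ (hdc _ (by simp)), if_neg hne]
    by_cases h1 : c1 = 'e'
    · subst h1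
      rw [if_pos rfl, loop_step 1 2 'n' delta_get1 _ _ (hdc _ (by simp))]
      by_cases h2 : c2 = 'n'
      · subst h2
        rw [if_pos rfl,
          if_pos (show PySem.Chars.startswith ['e', 'n', 'd'] ['e', 'n'] = true by decide)]
        rfl
      · rw [if_neg h2,
          if_neg (show ¬ PySem.Chars.startswith ['e', 'n', 'd'] ['e', c2] = true from
            fun hp => h2 (List.cons_prefix_cons.mp
              (List.cons_prefix_cons.mp ((prefix_end _).mp hp)).2).1)]
        rfl
    · rw [if_neg h1,
        if_neg (show ¬ PySem.Chars.startswith ['e', 'n', 'd'] [c1, c2] = true from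
          fun hp => h1 (List.cons_prefix_cons.mp ((prefix_end _).mp hp)).1)]
      rfl
  · -- three or more characters
    by_cases h1 : c1 = 'e'
    · subst h1
      rw [loop_step 0 1 'e' delta_get0 _ _ (hdc _ (by simp)), if_pos rfl]
      by_cases h2 : c2 = 'n'
      · subst h2
        rw [loop_step 1 2 'n' delta_get1 _ _ (hdc _ (by simp)), if_pos rfl]
        by_cases h3 : c3 = 'd'
        · subst h3
          rw [loop_step 2 3 'd' delta_get2 _ _ (hdc _ (by simp)), if_pos rfl]
          rcases rest with _ | ⟨c4, rest'⟩
          · rw [if_pos (hend.mpr rfl)]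
            rfl
          · have hne : ¬ cadena = "end" := fun h => by simp [hend] at h
            rw [loop_st3 _ (by simp), if_neg hne,
              if_neg (show ¬ PySem.Chars.startswith ['e', 'n', 'd']
                  ('e' :: 'n' :: 'd' :: c4 :: rest') = true from fun hp => by
                have hlen := ((prefix_end _).mp hp).length_le
                simp only [List.length_cons, List.length_nil] at hlen
                omega)]
            rfl
        · have hne : ¬ cadena = "end" := fun h => by
            have h' := hend.mp h
            injection h' with _ h'
            injection h' with _ h'
            injection h' with hc _
            exact h3 hc
          rw [loop_step 2 3 'd' delta_get2 _ _ (hdc _ (by simp)), if_neg h3, if_neg hne,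
            if_neg (show ¬ PySem.Chars.startswith ['e', 'n', 'd']
                ('e' :: 'n' :: c3 :: rest) = true from fun hp => h3
              (List.cons_prefix_cons.mp (List.cons_prefix_cons.mp
                (List.cons_prefix_cons.mp ((prefix_end _).mp hp)).2).2).1)]
          rfl
      · have hne : ¬ cadena = "end" := fun h => by
          have h' := hend.mp h
          injection h' with _ h'
          injection h' with hc _
          exact h2 hc
        rw [loop_step 1 2 'n' delta_get1 _ _ (hdc _ (by simp)), if_neg h2, if_neg hne,
          if_neg (show ¬ PySem.Chars.startswith ['e', 'n', 'd']
              ('e' :: c2 :: c3 :: rest) = true from fun hp => h2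
            (List.cons_prefix_cons.mp (List.cons_prefix_cons.mp
              ((prefix_end _).mp hp)).2).1)]
        rfl
    · have hne : ¬ cadena = "end" := fun h => by
        have h' := hend.mp h
        injection h' with hc _
        exact h1 hc
      rw [loop_step 0 1 'e' delta_get0 _ _ (hdc _ (by simp)), if_neg h1, if_neg hne,
        if_neg (show ¬ PySem.Chars.startswith ['e', 'n', 'd']
            (c1 :: c2 :: c3 :: rest) = true from fun hp => h1
          (List.cons_prefix_cons.mp ((prefix_end _).mp hp)).1)]
      rfl
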